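-- pv_equiv track=rewrite | github.com/boostcampaitech3/final-project-level3-cv-05 | sumin/tab_transform.py | check_phone_type_text
-- ===== SOURCE A (Python) =====
-- def check_phone_type_text(text: str) -> int:
--     """
--     text 가 phone type text(숫자, '.', '+', '(', ')', '-', ' ') 로만 이루어졌는지 확인한다
--
--     Args:
--         text (str): bbox 내의 text
--
--     Returns:
--         int: 숫자 or '.' or '+' or '(' or ')' or '-' or ' ' 문자만 포함된 경우 1, 아닌 경우 0을 반환
--     """
--
--     '''
--         Verify it is phone type text
--     '''
--     phone_type_char = '0123456789.+()- '
--
--     for c in text: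
--         if c not in phone_type_char:
--             return 0
--     return 1
-- ===== SOURCE B (Python) =====
-- def check_phone_type_text(text: str) -> int:
--     # Counting argument: text consists only of allowed characters iff the
--     # occurrence counts of the 17 allowed characters account for every position.
--     return 1 if sum(text.count(c) for c in '0123456789.+()- ') == len(text) else 0
-- ===== Notes on version B (the rewrite author's own statement) =====
-- stated objective: alternative
-- what changed: Replaces A's per-character early-return scan of the text by a counting argument: iterate over the 17-character alphabet, sum text.count(c), and return 1 iff the counts add up to len(text).
import Mathlib
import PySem

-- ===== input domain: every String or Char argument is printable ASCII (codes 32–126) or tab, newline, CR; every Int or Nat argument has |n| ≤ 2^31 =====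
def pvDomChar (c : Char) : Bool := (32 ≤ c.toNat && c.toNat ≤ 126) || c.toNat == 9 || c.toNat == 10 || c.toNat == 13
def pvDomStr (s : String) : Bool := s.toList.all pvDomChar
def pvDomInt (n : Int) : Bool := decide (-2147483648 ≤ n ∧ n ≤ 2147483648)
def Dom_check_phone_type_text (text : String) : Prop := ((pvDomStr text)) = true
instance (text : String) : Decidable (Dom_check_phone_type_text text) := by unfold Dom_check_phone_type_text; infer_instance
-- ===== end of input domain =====

-- B replaces A's per-character early-return scan by a counting argument over the 17-character alphabet (alternative; same behaviour).


-- ===== PORT A =====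
-- A's loop: return 0 at the first character not in the alphabet, 1 if the loop finishes
def pvLoopA : List Char → Int
  | [] => 1
  | c :: rest => if c ∉ "0123456789.+()- ".toList then 0 else pvLoopA rest

def check_phone_type_text (text : String) : Int := pvLoopA text.toList

-- ===== PORT B =====
-- text.count(c) for a one-character c = List.count of that character (exact on any string)
def check_phone_type_text_alt (text : String) : Int :=
  if ("0123456789.+()- ".toList.map (fun c => PySem.List.count text.toList c)).sum
      = text.toList.length then 1 else 0

-- ===== PRECONDITION & SPEC =====
def Spec_check_phone_type_text (text : String) (out : Int) : Prop := out = check_phone_type_text_alt text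
instance (text : String) (out : Int) : Decidable (Spec_check_phone_type_text text out) := by unfold Spec_check_phone_type_text; infer_instance

-- ===== CLAIM (what is proved, stated in full; the proofs are below) =====
def Claim_equal_check_phone_type_text : Prop := ∀ (text : String), Dom_check_phone_type_text text → Spec_check_phone_type_text text (check_phone_type_text text)

-- ===== LEMMAS AND PROOFS =====
theorem pvLoopA_eq (cs : List Char) :
    pvLoopA cs = if ∀ c ∈ cs, c ∈ "0123456789.+()- ".toList then 1 else 0 := by
  induction cs with
  | nil => rw [pvLoopA, if_pos (by intro c hc; cases hc)]
  | cons c rest ih =>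
    rw [pvLoopA, ih]
    by_cases h1 : c ∈ "0123456789.+()- ".toList <;>
      by_cases h2 : ∀ x ∈ rest, x ∈ "0123456789.+()- ".toList
    · rw [if_neg (not_not_intro h1), if_pos h2, if_pos (List.forall_mem_cons.2 ⟨h1, h2⟩)]
    · rw [if_neg (not_not_intro h1), if_neg h2,
        if_neg (fun hall => h2 (List.forall_mem_cons.1 hall).2)]
    · rw [if_pos h1, if_neg (fun hall => h1 (List.forall_mem_cons.1 hall).1)]
    · rw [if_pos h1, if_neg (fun hall => h1 (List.forall_mem_cons.1 hall).1)]

-- a nodup list of keys: the indicators of x against each key sum to x's membership bit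
theorem sum_indicator (x : Char) (ds : List Char) (hnd : ds.Nodup) :
    (ds.map (fun d => if x = d then 1 else 0)).sum = (if x ∈ ds then 1 else 0 : Nat) := by
  induction ds with
  | nil => simp
  | cons d rest ih =>
    rcases List.nodup_cons.1 hnd with ⟨hd, hrest⟩
    by_cases hx : x = d
    · subst hx
      simp [ih hrest, if_neg hd]
    · simp [hx, ih hrest]

-- counts over a nodup alphabet sum to the number of positions whose character is in it
theorem sum_counts (cs : List Char) (ds : List Char) (hnd : ds.Nodup) :
    (ds.map (fun d => cs.count d)).sum = cs.countP (fun c => decide (c ∈ ds)) := by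
  induction cs with
  | nil => simp
  | cons x cs ih =>
    have hcount : ∀ d, (x :: cs).count d = cs.count d + (if d = x then 1 else 0) := by
      intro d
      rw [List.count_cons]
      by_cases h : d = x
      · simp [h]
      · simp only [if_neg h, beq_iff_eq, if_neg (fun hx : x = d => h hx.symm)]
    calc (ds.map (fun d => (x :: cs).count d)).sum
        = (ds.map (fun d => cs.count d + (if d = x then 1 else 0))).sum := by
          simp only [hcount]
      _ = (ds.map (fun d => cs.count d)).sum + (ds.map (fun d => if d = x then 1 else 0)).sum := by
          rw [← List.sum_map_add]
      _ = cs.countP (fun c => decide (c ∈ ds)) + (if x ∈ ds then 1 else 0) := by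
          rw [ih]
          congr 1
          have := sum_indicator x ds hnd
          simpa [eq_comm] using this
      _ = (x :: cs).countP (fun c => decide (c ∈ ds)) := by
          rw [List.countP_cons]
          by_cases hx : x ∈ ds <;> simp [hx]

-- ===== VERDICT (by name: the statement is the Claim_ definition above) =====
theorem check_phone_type_text_spec : Claim_equal_check_phone_type_text := by
  intro text _
  unfold Spec_check_phone_type_text check_phone_type_text check_phone_type_text_alt
  rw [pvLoopA_eq]
  have hnd : ("0123456789.+()- ".toList).Nodup := by decide
  have hcnt :
      ("0123456789.+()- ".toList.map (fun c => PySem.List.count text.toList c)).sum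
        = text.toList.countP (fun c => decide (c ∈ "0123456789.+()- ".toList)) := by
    simpa [PySem.List.count_eq] using sum_counts text.toList _ hnd
  rw [hcnt]
  by_cases h : ∀ c ∈ text.toList, c ∈ "0123456789.+()- ".toList
  · rw [if_pos h, if_pos (List.countP_eq_length.2 (by simpa using h))]
  · rw [if_neg h, if_neg (fun he => h (by simpa using List.countP_eq_length.1 he))]
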